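-- pv_equiv track=rewrite | github.com/Keirua/aoc2020 | 21.py | extract_possible_words
-- ===== SOURCE A (Python) =====
-- def extract_possible_words(recipes):
--     possible_words = {}
--     all_cipher_ingredients = set()
--     for cipher,plaintext in recipes:
--         all_cipher_ingredients = all_cipher_ingredients.union(cipher)
--
--         for p in plaintext:
--             if p not in possible_words:
--                 possible_words[p] = set(cipher)
--             else:
--                 possible_words[p] = possible_words[p].intersection(cipher)
--     return possible_words, all_cipher_ingredients
-- ===== SOURCE B (Python) =====
-- def extract_possible_words(recipes):
--     # Two-pass: first gather every cipher list per allergen (and the global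
--     # ingredient set), then reduce each group with one multi-way intersection.
--     groups = {}
--     all_cipher_ingredients = set()
--     for cipher, plaintext in recipes:
--         all_cipher_ingredients = all_cipher_ingredients.union(cipher)
--         for p in plaintext:
--             groups[p] = groups.get(p, []) + [cipher]
--     possible_words = {p: set(cs[0]).intersection(*cs[1:]) for p, cs in groups.items()}
--     return possible_words, all_cipher_ingredients
-- ===== Notes on version B (the rewrite author's own statement) =====
-- stated objective: alternative
-- what changed: B first groups all cipher lists per allergen (and unions the global ingredient set), then in a second pass reduces each group with one multi-way set intersection, instead of folding the intersection incrementally while scanning.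
import Mathlib
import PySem

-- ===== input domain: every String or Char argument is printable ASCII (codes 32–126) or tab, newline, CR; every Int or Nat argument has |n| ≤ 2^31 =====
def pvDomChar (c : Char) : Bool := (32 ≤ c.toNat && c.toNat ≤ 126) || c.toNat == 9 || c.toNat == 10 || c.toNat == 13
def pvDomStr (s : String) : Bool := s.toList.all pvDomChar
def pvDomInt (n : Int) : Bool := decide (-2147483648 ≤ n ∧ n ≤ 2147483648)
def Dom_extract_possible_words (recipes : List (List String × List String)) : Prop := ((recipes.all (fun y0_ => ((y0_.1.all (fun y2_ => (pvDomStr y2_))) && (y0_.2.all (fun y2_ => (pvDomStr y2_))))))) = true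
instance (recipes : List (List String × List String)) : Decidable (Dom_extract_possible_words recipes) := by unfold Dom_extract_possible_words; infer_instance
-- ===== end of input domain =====

-- B groups all cipher lists per allergen first and reduces each group with one
-- multi-way intersection, instead of A's incremental intersection while scanning
-- (objective: alternative decomposition; return value proved identical).

-- ===== PORT A =====
-- inner loop body: 'if p not in possible_words: … else: …' (possible_words[p]
-- is guarded by the membership test, so getD's default is never used)
def pvInnerA (cipher : List String) (d : PySem.Dict String (PySem.Set String)) (p : String) : PySem.Dict String (PySem.Set String) :=
  if d.contains p = false then d.insert p (PySem.Set.ofList cipher)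
  else d.insert p (PySem.Set.inter (d.getD p PySem.Set.empty) cipher)

def pvStepA (st : PySem.Dict String (PySem.Set String) × PySem.Set String) (r : List String × List String) : PySem.Dict String (PySem.Set String) × PySem.Set String :=
  (r.2.foldl (pvInnerA r.1) st.1, PySem.Set.union st.2 r.1)

def extract_possible_words (recipes : List (List String × List String)) : (List (String × List String)) × List String :=
  let st := recipes.foldl pvStepA (PySem.Dict.empty, PySem.Set.empty)
  (st.1.items, st.2)

-- ===== PORT B =====
-- groups[p] = groups.get(p, []) + [cipher]
def pvInnerB (cipher : List String) (d : PySem.Dict String (List (List String))) (p : String) : PySem.Dict String (List (List String)) :=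
  d.modify p [] (fun l => l ++ [cipher])

def pvStepB (st : PySem.Dict String (List (List String)) × PySem.Set String) (r : List String × List String) : PySem.Dict String (List (List String)) × PySem.Set String :=
  (r.2.foldl (pvInnerB r.1) st.1, PySem.Set.union st.2 r.1)

-- set(cs[0]).intersection(*cs[1:]); the [] case is unreachable (groups values are nonempty)
def pvReduceInter : List (List String) → PySem.Set String
  | [] => PySem.Set.empty
  | c :: rest => rest.foldl PySem.Set.inter (PySem.Set.ofList c)

def extract_possible_words_alt (recipes : List (List String × List String)) : (List (String × List String)) × List String :=
  let st := recipes.foldl pvStepB (PySem.Dict.empty, PySem.Set.empty)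
  (st.1.items.map (fun pr => (pr.1, pvReduceInter pr.2)), st.2)

-- ===== PRECONDITION & SPEC =====
def Spec_extract_possible_words (recipes : List (List String × List String)) (out : (List (String × List String)) × List String) : Prop := out = extract_possible_words_alt recipes
instance (recipes : List (List String × List String)) (out : (List (String × List String)) × List String) : Decidable (Spec_extract_possible_words recipes out) := by unfold Spec_extract_possible_words; infer_instance

-- ===== CLAIM (what is proved, stated in full; the proofs are below) =====
def Claim_equal_extract_possible_words : Prop := ∀ (recipes : List (List String × List String)), Dom_extract_possible_words recipes → Spec_extract_possible_words recipes (extract_possible_words recipes)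

-- ===== LEMMAS AND PROOFS =====

def pvMapVals (d : PySem.Dict String (List (List String))) : PySem.Dict String (PySem.Set String) :=
  PySem.Dict.mk (d.items.map (fun pr => (pr.1, pvReduceInter pr.2)))

def pvValsNE (d : PySem.Dict String (List (List String))) : Prop :=
  ∀ pr ∈ d.items, pr.2 ≠ ([] : List (List String))

theorem pvRed_append (v : List (List String)) (c : List String) (h : v ≠ []) :
    pvReduceInter (v ++ [c]) = PySem.Set.inter (pvReduceInter v) c := by
  cases v with
  | nil => exact absurd rfl h
  | cons a rest => simp [pvReduceInter, List.foldl_append]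

theorem pvContains_mapVals (d : PySem.Dict String (List (List String))) (p : String) :
    (pvMapVals d).contains p = d.contains p := by
  simp only [pvMapVals, PySem.Dict.contains, List.any_map]
  rfl

theorem pvFind?_map (l : List (String × List (List String))) (p : String) :
    List.find? (fun pr => pr.1 == p) (l.map (fun pr => (pr.1, pvReduceInter pr.2))) =
      (List.find? (fun pr => pr.1 == p) l).map (fun pr => (pr.1, pvReduceInter pr.2)) := by
  induction l with
  | nil => rfl
  | cons q qs ih =>
    by_cases hq : q.1 == p
    · simp [hq]
    · simp [hq, ih]

theorem pvGet?_mapVals (d : PySem.Dict String (List (List String))) (p : String) :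
    (pvMapVals d).get? p = (d.get? p).map pvReduceInter := by
  simp only [pvMapVals, PySem.Dict.get?, pvFind?_map]
  cases List.find? (fun pr => pr.1 == p) d.items <;> rfl

theorem pvMapVals_insert (d : PySem.Dict String (List (List String))) (p : String)
    (w : List (List String)) :
    pvMapVals (d.insert p w) = (pvMapVals d).insert p (pvReduceInter w) := by
  unfold PySem.Dict.insert
  rw [pvContains_mapVals]
  by_cases hc : d.contains p = true
  · simp only [if_pos hc]
    apply PySem.Dict.ext
    simp only [pvMapVals, List.map_map]
    apply List.map_congr_left
    intro q _
    by_cases hq : q.1 == p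
    · simp [Function.comp, hq]
    · simp [Function.comp, hq]
  · simp only [if_neg hc]
    apply PySem.Dict.ext
    simp [pvMapVals]

theorem pvInner_mapVals (c : List String) (d : PySem.Dict String (List (List String))) (p : String)
    (h : pvValsNE d) : pvInnerA c (pvMapVals d) p = pvMapVals (pvInnerB c d p) := by
  unfold pvInnerA pvInnerB PySem.Dict.modify
  rw [pvMapVals_insert, pvContains_mapVals]
  by_cases hc : d.contains p = true
  · obtain ⟨e', he'⟩ : ∃ e', List.find? (fun pr => pr.1 == p) d.items = some e' := by
      obtain ⟨e, he, hep⟩ : ∃ e ∈ d.items, (e.1 == p) = true := by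
        simpa [PySem.Dict.contains, List.any_eq_true] using hc
      cases hfind : List.find? (fun pr => pr.1 == p) d.items with
      | none =>
        rw [List.find?_eq_none] at hfind
        exact absurd hep (by simpa using hfind e he)
      | some e'' => exact ⟨e'', rfl⟩
    have hne : e'.2 ≠ [] := h e' (List.mem_of_find?_eq_some he')
    have hgd : d.get? p = some e'.2 := by simp [PySem.Dict.get?, he']
    rw [if_neg (by simp [hc])]
    congr 1
    simp [PySem.Dict.getD, hgd, pvGet?_mapVals, pvRed_append e'.2 c hne]
  · have hc' : d.contains p = false := by simpa using hc
    rw [if_pos hc']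
    congr 1
    have hgn : d.get? p = none := by
      simp only [PySem.Dict.get?, Option.map_eq_none_iff]
      rw [List.find?_eq_none]
      intro x hx
      simp only [PySem.Dict.contains, List.any_eq_false] at hc'
      simpa using hc' x hx
    simp [PySem.Dict.getD, hgn, pvReduceInter]

theorem pvValsNE_innerB (c : List String) (d : PySem.Dict String (List (List String))) (p : String)
    (h : pvValsNE d) : pvValsNE (pvInnerB c d p) := by
  intro pr hpr
  simp only [pvInnerB, PySem.Dict.modify, PySem.Dict.insert] at hpr
  split at hpr
  · simp only [List.mem_map] at hpr
    obtain ⟨q, hq, hpq⟩ := hpr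
    by_cases hq1 : q.1 == p
    · simp only [hq1] at hpq
      subst hpq; simp
    · simp only [hq1] at hpq
      simp only [Bool.false_eq_true, if_false] at hpq
      subst hpq; exact h q hq
  · simp only [List.mem_append, List.mem_singleton] at hpr
    rcases hpr with hpr | hpr
    · exact h pr hpr
    · subst hpr; simp

theorem pvFoldl_inner (ps : List String) (c : List String) (d : PySem.Dict String (List (List String)))
    (h : pvValsNE d) :
    ps.foldl (pvInnerA c) (pvMapVals d) = pvMapVals (ps.foldl (pvInnerB c) d) := by
  induction ps generalizing d with
  | nil => rfl
  | cons p ps ih =>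
    simp only [List.foldl_cons, pvInner_mapVals c d p h]
    exact ih _ (pvValsNE_innerB c d p h)

theorem pvValsNE_foldl (ps : List String) (c : List String) (d : PySem.Dict String (List (List String)))
    (h : pvValsNE d) : pvValsNE (ps.foldl (pvInnerB c) d) := by
  induction ps generalizing d with
  | nil => exact h
  | cons p ps ih => exact ih _ (pvValsNE_innerB c d p h)

theorem pvFoldl_recipes (recipes : List (List String × List String))
    (d : PySem.Dict String (List (List String))) (s : PySem.Set String) (h : pvValsNE d) :
    recipes.foldl pvStepA (pvMapVals d, s) =
      ((pvMapVals (recipes.foldl pvStepB (d, s)).1, (recipes.foldl pvStepB (d, s)).2)) := by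
  induction recipes generalizing d s with
  | nil => rfl
  | cons r rs ih =>
    simp only [List.foldl_cons, pvStepA, pvStepB, pvFoldl_inner r.2 r.1 d h]
    exact ih _ _ (pvValsNE_foldl r.2 r.1 d h)

-- ===== VERDICT (by name: the statement is the Claim_ definition above) =====
theorem extract_possible_words_spec : Claim_equal_extract_possible_words := by
  intro recipes _
  unfold Spec_extract_possible_words extract_possible_words extract_possible_words_alt
  have h := pvFoldl_recipes recipes PySem.Dict.empty PySem.Set.empty (by intro pr hpr; cases hpr)
  simp only [show pvMapVals PySem.Dict.empty = PySem.Dict.empty from rfl] at h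
  simp only [PySem.Set.empty] at h ⊢
  simp [h, pvMapVals]
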